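-- pv_equiv track=rewrite | github.com/singhsaumy/python-tdd-classroom | DataGrokr Assignment/python-tdd-classroom-master/python-tdd-classroom-master/tests/src/string_exercise.py | get_word_lengths
-- ===== SOURCE A (Python) =====
-- def get_word_lengths(text):
--     """
--     Returns a list of integers representing
--     the word lengths in string text.
--     """
--     n=len(text)
--     ans_list=[]
--     ans=0
--     for i in range(0,n):
--         if(text[i]!=' '):
--             ans=ans+1
--         else:
--             ans_list.append(ans)
--             ans=0
--     ans_list.append(ans)
--     return ans_list
-- ===== SOURCE B (Python) =====
-- def get_word_lengths(text):
--     """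
--     Returns a list of integers representing
--     the word lengths in string text.
--     """
--     return [len(word) for word in text.split(' ')]
-- ===== Notes on version B (the rewrite author's own statement) =====
-- stated objective: simpler
-- what changed: Replaces the manual per-character counter loop (accumulator reset on separators, final flush) with a single-space split followed by mapping len over the resulting word fragments.
import Mathlib
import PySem

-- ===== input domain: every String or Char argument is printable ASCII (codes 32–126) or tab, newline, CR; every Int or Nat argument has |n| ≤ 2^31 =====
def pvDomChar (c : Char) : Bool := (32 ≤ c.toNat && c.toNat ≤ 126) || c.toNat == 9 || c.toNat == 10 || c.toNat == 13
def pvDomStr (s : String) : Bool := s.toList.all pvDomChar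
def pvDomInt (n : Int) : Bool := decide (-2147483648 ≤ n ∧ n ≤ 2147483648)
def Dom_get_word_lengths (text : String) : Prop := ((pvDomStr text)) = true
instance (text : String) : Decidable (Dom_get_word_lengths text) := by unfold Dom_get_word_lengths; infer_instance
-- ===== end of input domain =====

-- ===== PORT A =====
-- B replaces A's per-character counter loop with split-on-' ' then map len; same return value.
def get_word_lengths (text : String) : List Int :=
  -- literal port of A: scan every character, grow the counter, flush on ' ', final flush
  let st := text.toList.foldl
    (fun (p : List Int × Int) c => if c ≠ ' ' then (p.1, p.2 + 1) else (p.1 ++ [p.2], 0))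
    ([], 0)
  st.1 ++ [st.2]

-- ===== PORT B =====
def get_word_lengths_alt (text : String) : List Int :=
  (PySem.Chars.splitOn text.toList [' ']).map (fun w => (w.length : Int))

-- ===== PRECONDITION & SPEC =====
def Spec_get_word_lengths (text : String) (out : List Int) : Prop := out = get_word_lengths_alt text
instance (text : String) (out : List Int) : Decidable (Spec_get_word_lengths text out) := by unfold Spec_get_word_lengths; infer_instance

-- ===== CLAIM (what is proved, stated in full; the proofs are below) =====
def Claim_equal_get_word_lengths : Prop := ∀ (text : String), Dom_get_word_lengths text → Spec_get_word_lengths text (get_word_lengths text)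

-- ===== LEMMAS AND PROOFS =====

/-- Canonical split of a character list on single spaces (proof helper). -/
def spw : List Char → List (List Char)
  | [] => [[]]
  | c :: rest => if c = ' ' then [] :: spw rest
      else match spw rest with
        | [] => [[c]]
        | w :: ws => (c :: w) :: ws

def preHead (p : List Char) : List (List Char) → List (List Char)
  | [] => [p]
  | w :: ws => (p ++ w) :: ws

def addHead (n : Int) : List Int → List Int
  | [] => [n]
  | m :: ms => (n + m) :: ms

lemma spw_ne_nil (cs : List Char) : spw cs ≠ [] := by
  cases cs with
  | nil => simp [spw]
  | cons c rest =>
    simp only [spw]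
    split
    · simp
    · split <;> simp

lemma go_cons_space (n : Nat) (rest cur : List Char) (acc : List (List Char)) :
    PySem.Chars.splitOn.go [' '] (n+1) (' ' :: rest) cur acc
      = PySem.Chars.splitOn.go [' '] n rest [] (cur.reverse :: acc) := by
  show (if List.isPrefixOf [' '] (' ' :: rest)
          then PySem.Chars.splitOn.go [' '] n (List.drop 1 (' ' :: rest)) [] (cur.reverse :: acc)
          else PySem.Chars.splitOn.go [' '] n rest (' ' :: cur) acc) = _
  rw [if_pos (by simp [List.isPrefixOf])]
  simp

lemma go_cons_ne (n : Nat) (c : Char) (rest cur : List Char) (acc : List (List Char))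
    (hc : ¬ c = ' ') :
    PySem.Chars.splitOn.go [' '] (n+1) (c :: rest) cur acc
      = PySem.Chars.splitOn.go [' '] n rest (c :: cur) acc := by
  show (if List.isPrefixOf [' '] (c :: rest)
          then PySem.Chars.splitOn.go [' '] n (List.drop 1 (c :: rest)) [] (cur.reverse :: acc)
          else PySem.Chars.splitOn.go [' '] n rest (c :: cur) acc) = _
  rw [if_neg (by simp [List.isPrefixOf, Ne.symm hc])]

lemma splitOn_go_spec : ∀ (fuel : Nat) (l cur : List Char) (acc : List (List Char)),
    l.length ≤ fuel →
    PySem.Chars.splitOn.go [' '] fuel l cur acc = acc.reverse ++ preHead cur.reverse (spw l) := by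
  intro fuel
  induction fuel with
  | zero =>
    intro l cur acc h
    have : l = [] := List.eq_nil_of_length_eq_zero (Nat.le_zero.mp h)
    subst this
    simp [PySem.Chars.splitOn.go, spw, preHead]
  | succ n ih =>
    intro l cur acc h
    cases l with
    | nil => simp [PySem.Chars.splitOn.go, spw, preHead]
    | cons c rest =>
      by_cases hc : c = ' '
      · subst hc
        rw [go_cons_space n rest cur acc]
        rw [ih rest [] (cur.reverse :: acc) (by simpa using Nat.lt_succ_iff.mp (by simpa using h))]
        obtain ⟨w, ws, hws⟩ : ∃ w ws, spw rest = w :: ws := by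
          cases hsp : spw rest with
          | nil => exact absurd hsp (spw_ne_nil rest)
          | cons w ws => exact ⟨w, ws, rfl⟩
        simp [spw, hws, preHead]
      · rw [go_cons_ne n c rest cur acc hc]
        rw [ih rest (c :: cur) acc (by simpa using Nat.lt_succ_iff.mp (by simpa using h))]
        obtain ⟨w, ws, hws⟩ : ∃ w ws, spw rest = w :: ws := by
          cases hsp : spw rest with
          | nil => exact absurd hsp (spw_ne_nil rest)
          | cons w ws => exact ⟨w, ws, rfl⟩
        simp [spw, hc, hws, preHead]

lemma splitOn_eq_spw (cs : List Char) : PySem.Chars.splitOn cs [' '] = spw cs := by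
  rw [PySem.Chars.splitOn, splitOn_go_spec (cs.length + 1) cs [] [] (by omega)]
  obtain ⟨w, ws, hws⟩ : ∃ w ws, spw cs = w :: ws := by
    cases hsp : spw cs with
    | nil => exact absurd hsp (spw_ne_nil cs)
    | cons w ws => exact ⟨w, ws, rfl⟩
  simp [hws, preHead]

lemma fold_spec : ∀ (cs : List Char) (acc : List Int) (n : Int),
    (cs.foldl (fun (p : List Int × Int) c => if c ≠ ' ' then (p.1, p.2 + 1) else (p.1 ++ [p.2], 0)) (acc, n)).1
      ++ [(cs.foldl (fun (p : List Int × Int) c => if c ≠ ' ' then (p.1, p.2 + 1) else (p.1 ++ [p.2], 0)) (acc, n)).2]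
    = acc ++ addHead n ((spw cs).map (fun w => (w.length : Int))) := by
  intro cs
  induction cs with
  | nil => intro acc n; simp [spw, addHead]
  | cons c rest ih =>
    intro acc n
    by_cases hc : c = ' '
    · subst hc
      simp only [List.foldl_cons]
      rw [show (if (' ':Char) ≠ ' ' then (acc, n + 1) else (acc ++ [n], (0:Int))) = (acc ++ [n], (0:Int)) by simp,
          ih (acc ++ [n]) 0]
      obtain ⟨w, ws, hws⟩ : ∃ w ws, spw rest = w :: ws := by
        cases hsp : spw rest with
        | nil => exact absurd hsp (spw_ne_nil rest)
        | cons w ws => exact ⟨w, ws, rfl⟩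
      simp [spw, hws, addHead]
    · simp only [List.foldl_cons]
      rw [show (if c ≠ ' ' then (acc, n + 1) else (acc ++ [n], (0:Int))) = (acc, n + 1) by simp [hc],
          ih acc (n + 1)]
      obtain ⟨w, ws, hws⟩ : ∃ w ws, spw rest = w :: ws := by
        cases hsp : spw rest with
        | nil => exact absurd hsp (spw_ne_nil rest)
        | cons w ws => exact ⟨w, ws, rfl⟩
      simp [spw, hc, hws, addHead]
      ring

-- ===== VERDICT (by name: the statement is the Claim_ definition above) =====
theorem get_word_lengths_spec : Claim_equal_get_word_lengths := by
  intro text _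
  unfold Spec_get_word_lengths get_word_lengths get_word_lengths_alt
  rw [splitOn_eq_spw, fold_spec text.toList [] 0]
  obtain ⟨w, ws, hws⟩ : ∃ w ws, spw text.toList = w :: ws := by
    cases hsp : spw text.toList with
    | nil => exact absurd hsp (spw_ne_nil text.toList)
    | cons w ws => exact ⟨w, ws, rfl⟩
  simp [hws, addHead]
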